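-- pv_equiv track=rewrite | github.com/ann-elizabeth/TechX-Vibeathon | agents.py | generate_project_ideas
-- ===== SOURCE A (Python) =====
-- def generate_project_ideas(learned_skills):
--     """Generate project ideas based on learned skills"""
--     skill_set = set(s.lower() for s in learned_skills)
--
--     projects = []
--
--     if 'java' in skill_set and 'spring boot' in skill_set:
--         projects.append("Build a Task Management REST API with Spring Boot")
--
--     if 'react' in skill_set and 'node' in skill_set:
--         projects.append("Create a Full-stack Todo App (MERN stack)")
--
--     if 'python' in skill_set and 'sql' in skill_set:
--         projects.append("Build a Student Database Management System")
--
--     if 'docker' in skill_set: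
--         projects.append("Containerize your existing projects with Docker")
--
--     if 'python' in skill_set and 'tensorflow' in skill_set:
--         projects.append("Train an Image Classification Model")
--
--     if not projects:
--         projects.append("Build a portfolio project combining your new skills")
--
--     return projects
-- ===== SOURCE B (Python) =====
-- def _skill_bit(t):
--     if t == 'java':
--         return 1
--     if t == 'spring boot':
--         return 2
--     if t == 'react':
--         return 4
--     if t == 'node':
--         return 8
--     if t == 'python':
--         return 16
--     if t == 'sql':
--         return 32
--     if t == 'docker':
--         return 64
--     if t == 'tensorflow':
--         return 128
--     return 0
--
--
-- _RULES = [
--     (1 | 2, "Build a Task Management REST API with Spring Boot"),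
--     (4 | 8, "Create a Full-stack Todo App (MERN stack)"),
--     (16 | 32, "Build a Student Database Management System"),
--     (64, "Containerize your existing projects with Docker"),
--     (16 | 128, "Train an Image Classification Model"),
-- ]
--
--
-- def generate_project_ideas(learned_skills):
--     """Generate project ideas based on learned skills"""
--     mask = 0
--     for s in learned_skills:
--         mask |= _skill_bit(s.lower())
--     projects = [msg for req, msg in _RULES if mask & req == req]
--     return projects or ["Build a portfolio project combining your new skills"]
-- ===== Notes on version B (the rewrite author's own statement) =====
-- stated objective: alternative
-- what changed: Replaces A's lowercase skill set plus five hand-written membership-test branches with a bitmask: one fold ORs a per-skill bit into an integer and each project rule becomes a bitwise subset test (mask & req == req) over a mask table.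
import Mathlib
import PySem

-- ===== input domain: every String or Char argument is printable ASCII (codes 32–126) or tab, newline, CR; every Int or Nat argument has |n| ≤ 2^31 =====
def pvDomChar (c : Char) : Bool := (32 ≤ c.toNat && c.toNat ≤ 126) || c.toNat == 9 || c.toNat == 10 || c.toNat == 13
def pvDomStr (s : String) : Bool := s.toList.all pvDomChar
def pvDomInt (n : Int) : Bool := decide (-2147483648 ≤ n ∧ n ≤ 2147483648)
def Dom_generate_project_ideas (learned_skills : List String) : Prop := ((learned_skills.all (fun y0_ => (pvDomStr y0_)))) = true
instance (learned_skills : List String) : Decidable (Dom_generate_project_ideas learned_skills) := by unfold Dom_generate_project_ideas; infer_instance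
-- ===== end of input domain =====

-- B replaces A's set construction + five membership-test branches by a bitmask:
-- one fold ORs a per-skill bit into an integer, and each rule is a bitwise subset
-- test (mask & req == req) over a mask table (objective: alternative).

-- ===== PORT A =====
def generate_project_ideas (learned_skills : List String) : List String :=
  let skill_set : PySem.Set String :=
    PySem.Set.ofList (learned_skills.map (fun s => PySem.Str.lower s))
  let projects : List String := []
  let projects :=
    if skill_set.contains "java" && skill_set.contains "spring boot" then
      projects ++ ["Build a Task Management REST API with Spring Boot"] else projects
  let projects :=
    if skill_set.contains "react" && skill_set.contains "node" then
      projects ++ ["Create a Full-stack Todo App (MERN stack)"] else projects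
  let projects :=
    if skill_set.contains "python" && skill_set.contains "sql" then
      projects ++ ["Build a Student Database Management System"] else projects
  let projects :=
    if skill_set.contains "docker" then
      projects ++ ["Containerize your existing projects with Docker"] else projects
  let projects :=
    if skill_set.contains "python" && skill_set.contains "tensorflow" then
      projects ++ ["Train an Image Classification Model"] else projects
  let projects :=
    if projects.isEmpty then
      projects ++ ["Build a portfolio project combining your new skills"] else projects
  projects

-- ===== PORT B =====
def pvSkillBit (t : String) : Nat :=
  if t == "java" then 1
  else if t == "spring boot" then 2
  else if t == "react" then 4
  else if t == "node" then 8
  else if t == "python" then 16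
  else if t == "sql" then 32
  else if t == "docker" then 64
  else if t == "tensorflow" then 128
  else 0

def pvRules : List (Nat × String) :=
  [(1 ||| 2, "Build a Task Management REST API with Spring Boot"),
   (4 ||| 8, "Create a Full-stack Todo App (MERN stack)"),
   (16 ||| 32, "Build a Student Database Management System"),
   (64, "Containerize your existing projects with Docker"),
   (16 ||| 128, "Train an Image Classification Model")]

def generate_project_ideas_alt (learned_skills : List String) : List String :=
  let mask : Nat :=
    learned_skills.foldl (fun m s => m ||| pvSkillBit (PySem.Str.lower s)) 0
  let projects : List String :=
    (pvRules.filter (fun r => mask &&& r.1 == r.1)).map (fun r => r.2)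
  if projects.isEmpty then ["Build a portfolio project combining your new skills"]
  else projects

-- ===== PRECONDITION & SPEC =====
def Spec_generate_project_ideas (learned_skills : List String) (out : List String) : Prop := out = generate_project_ideas_alt learned_skills
instance (learned_skills : List String) (out : List String) : Decidable (Spec_generate_project_ideas learned_skills out) := by unfold Spec_generate_project_ideas; infer_instance

-- ===== CLAIM (what is proved, stated in full; the proofs are below) =====
def Claim_equal_generate_project_ideas : Prop := ∀ (learned_skills : List String), Dom_generate_project_ideas learned_skills → Spec_generate_project_ideas learned_skills (generate_project_ideas learned_skills)

-- ===== LEMMAS AND PROOFS =====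

-- mask & req = req  ↔  every bit of req is in mask
lemma pv_and_mask_eq (m r : Nat) :
    (m &&& r = r) ↔ ∀ i, r.testBit i = true → m.testBit i = true := by
  constructor
  · intro h i hi
    have := congrArg (fun x => Nat.testBit x i) h
    simp only [Nat.testBit_and, hi, Bool.and_true] at this
    exact this
  · intro h
    apply Nat.eq_of_testBit_eq
    intro i
    by_cases hr : r.testBit i
    · simp [Nat.testBit_and, hr, h i hr]
    · simp [Nat.testBit_and, hr]

lemma pv_and_one (m i : Nat) : (m &&& 2 ^ i = 2 ^ i) ↔ m.testBit i = true := by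
  rw [pv_and_mask_eq]
  constructor
  · intro h; exact h i (by simp)
  · intro h b hb
    rw [Nat.testBit_two_pow] at hb
    exact of_decide_eq_true hb ▸ h

lemma pv_and_two (m i j : Nat) :
    (m &&& (2 ^ i ||| 2 ^ j) = (2 ^ i ||| 2 ^ j)) ↔
      (m.testBit i = true ∧ m.testBit j = true) := by
  rw [pv_and_mask_eq]
  constructor
  · intro h
    exact ⟨h i (by simp [Nat.testBit_or, Nat.testBit_two_pow]),
           h j (by simp [Nat.testBit_or, Nat.testBit_two_pow])⟩
  · rintro ⟨h1, h2⟩ b hb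
    simp only [Nat.testBit_or, Nat.testBit_two_pow, Bool.or_eq_true] at hb
    rcases hb with hb | hb
    · exact of_decide_eq_true hb ▸ h1
    · exact of_decide_eq_true hb ▸ h2

-- a testBit of the OR-fold is an existential over the list
lemma pv_testBit_foldl (l : List String) (m i : Nat) :
    (l.foldl (fun a s => a ||| pvSkillBit (PySem.Str.lower s)) m).testBit i
      = (m.testBit i || l.any (fun s => (pvSkillBit (PySem.Str.lower s)).testBit i)) := by
  induction l generalizing m with
  | nil => simp
  | cons x xs ih =>
      simp [List.foldl_cons, ih, Nat.testBit_or, Bool.or_assoc]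

-- set membership after the lowercase map is an existential over the list
lemma pv_contains_eq_any (l : List String) (k : String) :
    (PySem.Set.ofList (l.map (fun s => PySem.Str.lower s))).contains k
      = l.any (fun s => PySem.Str.lower s == k) := by
  rw [Bool.eq_iff_iff, PySem.Set.contains_iff, List.any_eq_true]
  simp only [PySem.Set.mem_ofList, List.mem_map, beq_iff_eq]

-- each bit of pvSkillBit names one skill
lemma pv_bit0 (t : String) : (pvSkillBit t).testBit 0 = (t == "java") := by
  unfold pvSkillBit; split_ifs <;> simp_all
lemma pv_bit1 (t : String) : (pvSkillBit t).testBit 1 = (t == "spring boot") := by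
  unfold pvSkillBit; split_ifs <;> simp_all <;> decide
lemma pv_bit2 (t : String) : (pvSkillBit t).testBit 2 = (t == "react") := by
  unfold pvSkillBit; split_ifs <;> simp_all <;> decide
lemma pv_bit3 (t : String) : (pvSkillBit t).testBit 3 = (t == "node") := by
  unfold pvSkillBit; split_ifs <;> simp_all <;> decide
lemma pv_bit4 (t : String) : (pvSkillBit t).testBit 4 = (t == "python") := by
  unfold pvSkillBit; split_ifs <;> simp_all <;> decide
lemma pv_bit5 (t : String) : (pvSkillBit t).testBit 5 = (t == "sql") := by
  unfold pvSkillBit; split_ifs <;> simp_all <;> decide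
lemma pv_bit6 (t : String) : (pvSkillBit t).testBit 6 = (t == "docker") := by
  unfold pvSkillBit; split_ifs <;> simp_all <;> decide
lemma pv_bit7 (t : String) : (pvSkillBit t).testBit 7 = (t == "tensorflow") := by
  unfold pvSkillBit; split_ifs <;> simp_all <;> decide

-- ===== VERDICT (by name: the statement is the Claim_ definition above) =====
theorem generate_project_ideas_spec : Claim_equal_generate_project_ideas := by
  intro l _
  show generate_project_ideas l = generate_project_ideas_alt l
  unfold generate_project_ideas generate_project_ideas_alt pvRules
  simp only [List.filter_cons, List.filter_nil]
  have hmask : ∀ i, ((l.foldl (fun m s => m ||| pvSkillBit (PySem.Str.lower s)) 0).testBit i)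
      = l.any (fun s => (pvSkillBit (PySem.Str.lower s)).testBit i) := by
    intro i; rw [pv_testBit_foldl]; simp
  set ss := PySem.Set.ofList (l.map (fun s => PySem.Str.lower s)) with hss
  set mask := l.foldl (fun m s => m ||| pvSkillBit (PySem.Str.lower s)) 0 with hmk
  have e0 : mask.testBit 0 = ss.contains "java" := by
    rw [hmask, pv_contains_eq_any]; simp only [pv_bit0]
  have e1 : mask.testBit 1 = ss.contains "spring boot" := by
    rw [hmask, pv_contains_eq_any]; simp only [pv_bit1]
  have e2 : mask.testBit 2 = ss.contains "react" := by
    rw [hmask, pv_contains_eq_any]; simp only [pv_bit2]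
  have e3 : mask.testBit 3 = ss.contains "node" := by
    rw [hmask, pv_contains_eq_any]; simp only [pv_bit3]
  have e4 : mask.testBit 4 = ss.contains "python" := by
    rw [hmask, pv_contains_eq_any]; simp only [pv_bit4]
  have e5 : mask.testBit 5 = ss.contains "sql" := by
    rw [hmask, pv_contains_eq_any]; simp only [pv_bit5]
  have e6 : mask.testBit 6 = ss.contains "docker" := by
    rw [hmask, pv_contains_eq_any]; simp only [pv_bit6]
  have e7 : mask.testBit 7 = ss.contains "tensorflow" := by
    rw [hmask, pv_contains_eq_any]; simp only [pv_bit7]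
  have r1 : (mask &&& (1 ||| 2) == (1 ||| 2)) = (ss.contains "java" && ss.contains "spring boot") := by
    rw [Bool.eq_iff_iff]
    simp only [beq_iff_eq, Bool.and_eq_true, ← e0, ← e1]
    exact pv_and_two mask 0 1
  have r2 : (mask &&& (4 ||| 8) == (4 ||| 8)) = (ss.contains "react" && ss.contains "node") := by
    rw [Bool.eq_iff_iff]
    simp only [beq_iff_eq, Bool.and_eq_true, ← e2, ← e3]
    exact pv_and_two mask 2 3
  have r3 : (mask &&& (16 ||| 32) == (16 ||| 32)) = (ss.contains "python" && ss.contains "sql") := by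
    rw [Bool.eq_iff_iff]
    simp only [beq_iff_eq, Bool.and_eq_true, ← e4, ← e5]
    exact pv_and_two mask 4 5
  have r4 : (mask &&& 64 == 64) = (ss.contains "docker") := by
    rw [Bool.eq_iff_iff]
    simp only [beq_iff_eq, ← e6]
    exact pv_and_one mask 6
  have r5 : (mask &&& (16 ||| 128) == (16 ||| 128)) = (ss.contains "python" && ss.contains "tensorflow") := by
    rw [Bool.eq_iff_iff]
    simp only [beq_iff_eq, Bool.and_eq_true, ← e4, ← e7]
    exact pv_and_two mask 4 7
  rw [r1, r2, r3, r4, r5]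
  generalize (ss.contains "java" && ss.contains "spring boot") = c1
  generalize (ss.contains "react" && ss.contains "node") = c2
  generalize (ss.contains "python" && ss.contains "sql") = c3
  generalize (ss.contains "docker") = c4
  generalize (ss.contains "python" && ss.contains "tensorflow") = c5
  cases c1 <;> cases c2 <;> cases c3 <;> cases c4 <;> cases c5 <;> rfl
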